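-- pv_equiv track=rewrite | github.com/DrorPezo/LLM4BGP | tools/whois/whois_aux.py | collect_remarks
-- ===== SOURCE A (Python) =====
-- from typing import List, Dict, Optional, Iterable
--
-- def collect_remarks(rows: Iterable[tuple[str, str]]) -> List[str]:
--     paras: List[str] = []
--     bucket: List[str] = []
--
--     for attr, txt in rows:
--         if attr != "remarks":
--             continue
--         if not txt:
--             if bucket:
--                 paras.append(" ".join(bucket))
--                 bucket = []
--         else:
--             bucket.append(txt)
--     if bucket:
--         paras.append(" ".join(bucket))
--     return paras
-- ===== SOURCE B (Python) =====
-- from itertools import groupby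
-- from typing import List, Iterable
--
-- def collect_remarks(rows: Iterable[tuple[str, str]]) -> List[str]:
--     texts = [txt for attr, txt in rows if attr == "remarks"]
--     return [" ".join(group) for nonempty, group in groupby(texts, key=bool) if nonempty]
-- ===== Notes on version B (the rewrite author's own statement) =====
-- stated objective: simpler
-- what changed: Replaced the stateful loop with a running bucket and final flush by a two-phase pipeline: filter the 'remarks' texts, then itertools.groupby on truthiness and join each nonempty run.
import Mathlib
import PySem

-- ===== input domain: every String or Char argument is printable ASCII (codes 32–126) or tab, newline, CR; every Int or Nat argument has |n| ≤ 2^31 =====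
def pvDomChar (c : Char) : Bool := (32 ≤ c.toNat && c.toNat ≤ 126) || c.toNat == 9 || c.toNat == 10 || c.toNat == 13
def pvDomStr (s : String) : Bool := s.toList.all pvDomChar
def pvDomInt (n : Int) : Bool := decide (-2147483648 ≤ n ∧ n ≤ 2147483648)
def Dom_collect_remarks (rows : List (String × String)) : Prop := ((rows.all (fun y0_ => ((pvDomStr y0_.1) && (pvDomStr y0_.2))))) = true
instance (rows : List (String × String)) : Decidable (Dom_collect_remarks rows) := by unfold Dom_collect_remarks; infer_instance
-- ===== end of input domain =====

-- B replaces A's stateful bucket loop by a filter phase followed by run-grouping (itertools.groupby); same values, no speed claim.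

-- ===== PORT A =====
-- A's for-loop: fold over rows carrying (paras, bucket); then the final flush of bucket.
def collect_remarks (rows : List (String × String)) : List String :=
  let st := rows.foldl (fun (st : List String × List String) pr =>
      let paras := st.1
      let bucket := st.2
      if pr.1 ≠ "remarks" then (paras, bucket)
      else if pr.2 = "" then
        (if bucket ≠ [] then (paras ++ [PySem.Str.join " " bucket], []) else (paras, bucket))
      else (paras, bucket ++ [pr.2])) ([], [])
  if st.2 ≠ [] then st.1 ++ [PySem.Str.join " " st.2] else st.1

-- ===== PORT B =====
-- groupby(texts, key=bool): each maximal run of nonempty strings becomes one joined paragraph,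
-- runs of empty strings are skipped.
def pvGroupParas : List String → List String
  | [] => []
  | t :: rest =>
    if t = "" then pvGroupParas rest
    else PySem.Str.join " " (t :: rest.takeWhile (fun s => s ≠ "")) ::
         pvGroupParas (rest.dropWhile (fun s => s ≠ ""))
termination_by ts => ts.length
decreasing_by
  · simp
  · have := List.length_dropWhile_le (p := fun s => decide (s ≠ "")) (l := rest)
    simp at this ⊢; omega

def collect_remarks_alt (rows : List (String × String)) : List String :=
  let texts := (rows.filter (fun pr => pr.1 == "remarks")).map (fun pr => pr.2)
  pvGroupParas texts

-- ===== PRECONDITION & SPEC =====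
def Spec_collect_remarks (rows : List (String × String)) (out : List String) : Prop := out = collect_remarks_alt rows
instance (rows : List (String × String)) (out : List String) : Decidable (Spec_collect_remarks rows out) := by unfold Spec_collect_remarks; infer_instance

-- ===== CLAIM (what is proved, stated in full; the proofs are below) =====
def Claim_equal_collect_remarks : Prop := ∀ (rows : List (String × String)), Dom_collect_remarks rows → Spec_collect_remarks rows (collect_remarks rows)

-- ===== LEMMAS AND PROOFS =====

-- proof-only names for A's fold step and final flush (definitionally equal to the port's code)
def pvStep (st : List String × List String) (pr : String × String) : List String × List String :=
  let paras := st.1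
  let bucket := st.2
  if pr.1 ≠ "remarks" then (paras, bucket)
  else if pr.2 = "" then
    (if bucket ≠ [] then (paras ++ [PySem.Str.join " " bucket], []) else (paras, bucket))
  else (paras, bucket ++ [pr.2])

def pvFinish (st : List String × List String) : List String :=
  if st.2 ≠ [] then st.1 ++ [PySem.Str.join " " st.2] else st.1

theorem pv_collect_eq (rows : List (String × String)) :
    collect_remarks rows = pvFinish (rows.foldl pvStep ([], [])) := rfl

def pvTexts (rows : List (String × String)) : List String :=
  (rows.filter (fun pr => pr.1 == "remarks")).map (fun pr => pr.2)

theorem pv_takeWhile_append {p : String → Bool} {xs ys : List String}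
    (h : ∀ x ∈ xs, p x = true) :
    (xs ++ ys).takeWhile p = xs ++ ys.takeWhile p := by
  induction xs with
  | nil => simp
  | cons a l ih =>
    simp only [List.cons_append, List.takeWhile_cons, h a (by simp)]
    simp [ih (fun x hx => h x (by simp [hx]))]

theorem pv_dropWhile_append {p : String → Bool} {xs ys : List String}
    (h : ∀ x ∈ xs, p x = true) :
    (xs ++ ys).dropWhile p = ys.dropWhile p := by
  induction xs with
  | nil => simp
  | cons a l ih =>
    simp only [List.cons_append, List.dropWhile_cons, h a (by simp)]
    simp [ih (fun x hx => h x (by simp [hx]))]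

-- pvGroupParas on a nonempty-string prefix: the prefix merges into the first paragraph.
theorem pvGroupParas_append (bucket ts : List String)
    (hb : ∀ s ∈ bucket, s ≠ "") (hne : bucket ≠ []) :
    pvGroupParas (bucket ++ ts) =
      PySem.Str.join " " (bucket ++ ts.takeWhile (fun s => s ≠ "")) ::
      pvGroupParas (ts.dropWhile (fun s => s ≠ "")) := by
  match bucket with
  | [] => exact absurd rfl hne
  | b :: bs =>
    have hbne : b ≠ "" := hb b (by simp)
    have hbs : ∀ x ∈ bs, (fun s => decide (s ≠ "")) x = true := by
      intro x hx; simpa using hb x (by simp [hx])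
    rw [List.cons_append, pvGroupParas]
    rw [if_neg hbne, pv_takeWhile_append hbs, pv_dropWhile_append hbs]
    simp

-- main invariant for A's fold
theorem pv_aux (rows : List (String × String)) (paras bucket : List String)
    (hb : ∀ s ∈ bucket, s ≠ "") :
    pvFinish (rows.foldl pvStep (paras, bucket)) =
      paras ++ pvGroupParas (bucket ++ pvTexts rows) := by
  induction rows generalizing paras bucket with
  | nil =>
    simp only [List.foldl_nil, pvTexts, List.filter_nil, List.map_nil, List.append_nil, pvFinish]
    match bucket with
    | [] => simp [pvGroupParas]
    | b :: bs =>
      have h := pvGroupParas_append (b :: bs) [] hb (by simp)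
      simp only [List.append_nil, List.takeWhile_nil, List.dropWhile_nil] at h
      rw [h]
      simp [pvGroupParas]
  | cons pr rest ih =>
    rw [List.foldl_cons]
    have htexts : pvTexts (pr :: rest) =
        (if pr.1 = "remarks" then [pr.2] else []) ++ pvTexts rest := by
      simp only [pvTexts, List.filter_cons]
      by_cases h : pr.1 = "remarks" <;> simp [h]
    by_cases hattr : pr.1 = "remarks"
    · by_cases htxt : pr.2 = ""
      · by_cases hbne : bucket = []
        · have hst : pvStep (paras, bucket) pr = (paras, []) := by
            simp [pvStep, hattr, htxt, hbne]
          rw [hst, ih paras [] (by simp), htexts]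
          simp [hattr, htxt, hbne, pvGroupParas]
        · have hst : pvStep (paras, bucket) pr =
              (paras ++ [PySem.Str.join " " bucket], []) := by
            simp [pvStep, hattr, htxt, hbne]
          rw [hst, ih _ [] (by simp), htexts,
              pvGroupParas_append bucket _ hb hbne]
          simp [hattr, htxt, pvGroupParas]
      · have hst : pvStep (paras, bucket) pr = (paras, bucket ++ [pr.2]) := by
          simp [pvStep, hattr, htxt]
        have hb' : ∀ s ∈ bucket ++ [pr.2], s ≠ "" := by
          intro s hs
          rcases List.mem_append.1 hs with h | h
          · exact hb s h
          · simp at h; simpa [h] using htxt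
        rw [hst, ih _ _ hb', htexts]
        simp [hattr, htxt]
    · have hst : pvStep (paras, bucket) pr = (paras, bucket) := by
        simp [pvStep, hattr]
      rw [hst, ih _ _ hb, htexts]
      simp [hattr]

-- ===== VERDICT (by name: the statement is the Claim_ definition above) =====
theorem collect_remarks_spec : Claim_equal_collect_remarks := by
  intro rows _
  show collect_remarks rows = collect_remarks_alt rows
  rw [pv_collect_eq, pv_aux rows [] [] (by simp)]
  rfl
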